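-- pv_equiv track=rewrite | github.com/alireza-dantism/Designing-a-cross-reactivity-testing-tool-for-diagnostic-kit-primers | main.py | getBindingAlign
-- ===== SOURCE A (Python) =====
-- def getBindingAlign(sequence1,sequence2):
--     first_string = ""
--     middle_string = ""
--     second_string = ""
--     for seq1,seq2 in zip(sequence1,sequence2):
--         if (seq1==seq2):
--             middle_string+=seq1
--         else:
--             middle_string+="|"
--         first_string += seq1
--         second_string +=seq2
--     result = first_string+"\n"+middle_string + "\n"+second_string
--     return result
-- ===== SOURCE B (Python) =====
-- def getBindingAlign(sequence1, sequence2):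
--     n = min(len(sequence1), len(sequence2))
--
--     def align(lo, hi):
--         # returns the (top, middle, bottom) lines for positions [lo, hi)
--         if hi - lo == 0:
--             return ("", "", "")
--         if hi - lo == 1:
--             a, b = sequence1[lo], sequence2[lo]
--             return (a, a if a == b else "|", b)
--         k = (lo + hi) // 2
--         f1, m1, s1 = align(lo, k)
--         f2, m2, s2 = align(k, hi)
--         return (f1 + f2, m1 + m2, s1 + s2)
--
--     f, m, s = align(0, n)
--     return f + "\n" + m + "\n" + s
-- ===== Notes on version B (the rewrite author's own statement) =====
-- stated objective: alternative
-- what changed: Replaces A's single fused left-to-right three-accumulator loop over zip by a divide-and-conquer recursion that splits the index range in half, builds the three lines for each half independently, and concatenates them.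
import Mathlib
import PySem

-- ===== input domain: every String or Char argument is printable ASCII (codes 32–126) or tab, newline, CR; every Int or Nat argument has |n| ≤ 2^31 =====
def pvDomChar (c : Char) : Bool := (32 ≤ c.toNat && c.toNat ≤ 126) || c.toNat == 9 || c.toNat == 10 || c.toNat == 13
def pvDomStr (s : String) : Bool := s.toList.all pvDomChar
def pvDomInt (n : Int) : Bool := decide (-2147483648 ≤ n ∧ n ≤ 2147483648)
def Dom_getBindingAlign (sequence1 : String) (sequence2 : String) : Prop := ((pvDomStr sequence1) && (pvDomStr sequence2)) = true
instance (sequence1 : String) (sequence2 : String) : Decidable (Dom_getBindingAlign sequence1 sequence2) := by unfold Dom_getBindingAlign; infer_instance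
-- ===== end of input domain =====

-- B replaces A's fused left-to-right three-accumulator loop by a divide-and-conquer
-- recursion on the index range that builds each half's three lines independently and
-- concatenates them (objective: alternative).

-- ===== PORT A =====
-- A's for-loop over zip(sequence1, sequence2) with three growing string accumulators.
def getBindingAlignLoop : List (Char × Char) → String → String → String → String × String × String
  | [], first_string, middle_string, second_string => (first_string, middle_string, second_string)
  | (seq1, seq2) :: rest, first_string, middle_string, second_string =>
      let middle_string := if seq1 == seq2 then middle_string.push seq1 else middle_string.push '|'
      getBindingAlignLoop rest (first_string.push seq1) middle_string (second_string.push seq2)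

def getBindingAlign (sequence1 : String) (sequence2 : String) : String :=
  let st := getBindingAlignLoop (sequence1.toList.zip sequence2.toList) "" "" ""
  st.1 ++ "\n" ++ st.2.1 ++ "\n" ++ st.2.2

-- ===== PORT B =====
-- Source B's inner 'align(lo, hi)': every index it reads lies in [0, n), so the getD
-- default is never used; this matches Python's sequence1[lo]/sequence2[lo] exactly there.
def alignDC (l1 l2 : List Char) (lo hi : Nat) : String × String × String :=
  if hi - lo = 0 then ("", "", "")
  else if hi - lo = 1 then
    let a := l1.getD lo ' '
    let b := l2.getD lo ' '
    (String.singleton a, if a == b then String.singleton a else "|", String.singleton b)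
  else
    let k := (lo + hi) / 2
    let r1 := alignDC l1 l2 lo k
    let r2 := alignDC l1 l2 k hi
    (r1.1 ++ r2.1, r1.2.1 ++ r2.2.1, r1.2.2 ++ r2.2.2)
termination_by hi - lo
decreasing_by all_goals omega

def getBindingAlign_alt (sequence1 : String) (sequence2 : String) : String :=
  let n := min sequence1.toList.length sequence2.toList.length
  let r := alignDC sequence1.toList sequence2.toList 0 n
  r.1 ++ "\n" ++ r.2.1 ++ "\n" ++ r.2.2

-- ===== PRECONDITION & SPEC =====
def Spec_getBindingAlign (sequence1 : String) (sequence2 : String) (out : String) : Prop := out = getBindingAlign_alt sequence1 sequence2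
instance (sequence1 : String) (sequence2 : String) (out : String) : Decidable (Spec_getBindingAlign sequence1 sequence2 out) := by unfold Spec_getBindingAlign; infer_instance

-- ===== CLAIM (what is proved, stated in full; the proofs are below) =====
def Claim_equal_getBindingAlign : Prop := ∀ (sequence1 : String) (sequence2 : String), Dom_getBindingAlign sequence1 sequence2 → Spec_getBindingAlign sequence1 sequence2 (getBindingAlign sequence1 sequence2)

-- ===== LEMMAS AND PROOFS =====

def pvMidChar (p : Char × Char) : Char := if p.1 == p.2 then p.1 else '|'

-- A's loop appends, at the character level, the three projections of the zipped list.
theorem getBindingAlignLoop_eq (l : List (Char × Char)) :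
    ∀ (f m s : String),
      getBindingAlignLoop l f m s =
        (String.ofList (f.toList ++ l.map Prod.fst),
         String.ofList (m.toList ++ l.map pvMidChar),
         String.ofList (s.toList ++ l.map Prod.snd)) := by
  induction l with
  | nil => intro f m s; simp [getBindingAlignLoop]
  | cons hd tl ih =>
      intro f m s
      obtain ⟨a, b⟩ := hd
      simp only [getBindingAlignLoop, ih, List.map_cons]
      by_cases hab : a == b <;> simp [hab, pvMidChar]

-- B's divide-and-conquer produces, over [lo, hi), the maps of the corresponding
-- segment of the zipped list.
theorem alignDC_eq (l1 l2 : List Char) (lo hi : Nat)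
    (hhi : hi ≤ (l1.zip l2).length) :
    alignDC l1 l2 lo hi =
      (String.ofList ((((l1.zip l2).drop lo).take (hi - lo)).map Prod.fst),
       String.ofList ((((l1.zip l2).drop lo).take (hi - lo)).map pvMidChar),
       String.ofList ((((l1.zip l2).drop lo).take (hi - lo)).map Prod.snd)) := by
  fun_induction alignDC l1 l2 lo hi with
  | case1 lo hi h0 =>
      rw [h0]
      simp
  | case2 lo hi h0 h1 a b =>
      have hlt : lo < (l1.zip l2).length := by omega
      have hlt1 : lo < l1.length := by rw [List.length_zip] at hlt; omega
      have hlt2 : lo < l2.length := by rw [List.length_zip] at hlt; omega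
      have hdrop : (l1.zip l2).drop lo = (l1.zip l2)[lo] :: (l1.zip l2).drop (lo + 1) :=
        List.drop_eq_getElem_cons hlt
      rw [h1, hdrop]
      simp only [List.take_succ_cons, List.take_zero, List.map_cons, List.map_nil,
        List.getElem_zip, a, b]
      simp only [List.getD_eq_getElem _ _ hlt1, List.getD_eq_getElem _ _ hlt2]
      by_cases hab : l1[lo] == l2[lo] <;>
        refine Prod.ext ?_ (Prod.ext ?_ ?_) <;>
        (apply String.ext; simp [hab, pvMidChar, String.singleton])
  | case3 lo hi h0 h1 k r1 r2 ih2 ih1 =>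
      have hk1 : k ≤ (l1.zip l2).length := by omega
      simp only [r1, r2]
      rw [ih2 hk1, ih1 hhi]
      have hsplit : hi - lo = (k - lo) + (hi - k) := by omega
      rw [hsplit, List.take_add]
      have hdd : (((l1.zip l2).drop lo).drop (k - lo)) = (l1.zip l2).drop k := by
        rw [List.drop_drop]
        congr 1
        omega
      rw [hdd]
      refine Prod.ext ?_ (Prod.ext ?_ ?_) <;> (apply String.ext; simp)

theorem alignDC_zlen (l1 l2 : List Char) :
    alignDC l1 l2 0 (l1.zip l2).length =
      (String.ofList ((l1.zip l2).map Prod.fst),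
       String.ofList ((l1.zip l2).map pvMidChar),
       String.ofList ((l1.zip l2).map Prod.snd)) := by
  rw [alignDC_eq _ _ _ _ (le_refl _)]
  simp [List.take_of_length_le, List.length_zip]

-- ===== VERDICT (by name: the statement is the Claim_ definition above) =====
theorem getBindingAlign_spec : Claim_equal_getBindingAlign := by
  intro s1 s2 _
  unfold Spec_getBindingAlign getBindingAlign getBindingAlign_alt
  have hlen : min s1.toList.length s2.toList.length = (s1.toList.zip s2.toList).length := by
    rw [List.length_zip]
  simp only [getBindingAlignLoop_eq, hlen, alignDC_zlen]
  simp
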